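-- pv_equiv track=rewrite | github.com/Ranamoeen1/LeetCode-Solutions | 3637-trionic-array-i/3637-trionic-array-i.py | isTrionic
-- ===== SOURCE A (Python) =====
-- from typing import List
--
-- def isTrionic(nums: List[int]) -> bool:
--     n = len(nums)
--
--     for p in range(1, n - 2):
--         for q in range(p + 1, n - 1):
--             inc1 = all(nums[i] < nums[i + 1] for i in range(p))
--             if not inc1:
--                 continue
--
--             dec = all(nums[i] > nums[i + 1] for i in range(p, q))
--             if not dec:
--                 continue
--
--             inc2 = all(nums[i] < nums[i + 1] for i in range(q, n - 1))
--             if inc2: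
--                 return True
--     return False
-- ===== SOURCE B (Python) =====
-- from typing import List
--
-- def isTrionic(nums: List[int]) -> bool:
--     n = len(nums)
--     if n < 4:
--         return False
--     i = 0
--     while i + 1 < n and nums[i] < nums[i + 1]:
--         i += 1
--     p = i
--     if p == 0 or p >= n - 2:
--         return False
--     while i + 1 < n and nums[i] > nums[i + 1]:
--         i += 1
--     q = i
--     if q == p or q >= n - 1:
--         return False
--     while i + 1 < n and nums[i] < nums[i + 1]:
--         i += 1
--     return i == n - 1
-- ===== Notes on version B (the rewrite author's own statement) =====
-- stated objective: faster
-- what changed: Replaced the double loop over all candidate split points (p,q), each re-scanning the whole array with three all() passes, by a single left-to-right pass that climbs the forced maximal increasing run, then the maximal decreasing run, then checks the final increasing run reaches the end.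
import Mathlib
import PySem

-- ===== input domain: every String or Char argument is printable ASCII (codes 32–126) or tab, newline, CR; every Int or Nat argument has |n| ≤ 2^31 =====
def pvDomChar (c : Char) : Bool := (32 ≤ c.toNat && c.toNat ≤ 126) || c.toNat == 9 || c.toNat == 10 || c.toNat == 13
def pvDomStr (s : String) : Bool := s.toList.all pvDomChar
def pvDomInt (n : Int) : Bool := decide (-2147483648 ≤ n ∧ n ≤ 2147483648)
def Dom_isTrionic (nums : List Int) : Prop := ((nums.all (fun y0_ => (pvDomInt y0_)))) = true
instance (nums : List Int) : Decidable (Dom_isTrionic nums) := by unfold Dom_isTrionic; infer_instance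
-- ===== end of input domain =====

-- B replaces A's triple-nested scan over all split points by a single pass along the forced maximal runs (measured asymptotically faster).

-- ===== PORT A =====
-- all(nums[i] < nums[i+1] for i in range(a, b)); indices are always in range where A evaluates this
def pvAllInc (nums : List Int) (a b : Int) : Bool :=
  (PySem.List.pyRange a b 1).all
    (fun i => decide (PySem.List.pyGetD nums i 0 < PySem.List.pyGetD nums (i+1) 0))

-- all(nums[i] > nums[i+1] for i in range(a, b))
def pvAllDec (nums : List Int) (a b : Int) : Bool :=
  (PySem.List.pyRange a b 1).all
    (fun i => decide (PySem.List.pyGetD nums i 0 > PySem.List.pyGetD nums (i+1) 0))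

-- A's nested for-loops with `continue` = conjunction of the three checks; early `return True` = any
def isTrionic (nums : List Int) : Bool :=
  let n : Int := nums.length
  (PySem.List.pyRange 1 (n - 2) 1).any (fun p =>
    (PySem.List.pyRange (p + 1) (n - 1) 1).any (fun q =>
      pvAllInc nums 0 p && pvAllDec nums p q && pvAllInc nums q (n - 1)))

-- ===== PORT B =====
-- while i + 1 < n and nums[i] < nums[i+1]: i += 1
def pvClimbUp (nums : List Int) (i : Nat) : Nat :=
  if _ : i + 1 < nums.length ∧ nums.getD i 0 < nums.getD (i+1) 0 then
    pvClimbUp nums (i+1)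
  else i
termination_by nums.length - i
decreasing_by omega

-- while i + 1 < n and nums[i] > nums[i+1]: i += 1
def pvClimbDown (nums : List Int) (i : Nat) : Nat :=
  if _ : i + 1 < nums.length ∧ nums.getD i 0 > nums.getD (i+1) 0 then
    pvClimbDown nums (i+1)
  else i
termination_by nums.length - i
decreasing_by omega

def isTrionic_alt (nums : List Int) : Bool :=
  let n := nums.length
  if n < 4 then false else
  let p := pvClimbUp nums 0
  if p = 0 ∨ n - 2 ≤ p then false else
  let q := pvClimbDown nums p
  if q = p ∨ n - 1 ≤ q then false else
  let r := pvClimbUp nums q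
  decide (r = n - 1)

-- ===== PRECONDITION & SPEC =====
def Spec_isTrionic (nums : List Int) (out : Bool) : Prop := out = isTrionic_alt nums
instance (nums : List Int) (out : Bool) : Decidable (Spec_isTrionic nums out) := by unfold Spec_isTrionic; infer_instance

-- ===== CLAIM (what is proved, stated in full; the proofs are below) =====
def Claim_equal_isTrionic : Prop := ∀ (nums : List Int), Dom_isTrionic nums → Spec_isTrionic nums (isTrionic nums)

-- ===== LEMMAS AND PROOFS =====

-- strict increase / decrease of adjacent entries on the index interval [a, b)
def IncOn (nums : List Int) (a b : Nat) : Prop :=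
  ∀ k : Nat, a ≤ k → k < b → nums.getD k 0 < nums.getD (k+1) 0

def DecOn (nums : List Int) (a b : Nat) : Prop :=
  ∀ k : Nat, a ≤ k → k < b → nums.getD k 0 > nums.getD (k+1) 0

-- the common characterisation both ports are reduced to
def TrionicSpec (nums : List Int) : Prop :=
  ∃ p q : Nat, 1 ≤ p ∧ p + 2 < nums.length ∧ p < q ∧ q + 1 < nums.length ∧
    IncOn nums 0 p ∧ DecOn nums p q ∧ IncOn nums q (nums.length - 1)

theorem pvClimbUp_le (nums : List Int) (i : Nat) : i ≤ pvClimbUp nums i := by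
  induction i using pvClimbUp.induct nums with
  | case1 i h ih => rw [pvClimbUp, dif_pos h]; omega
  | case2 i h => rw [pvClimbUp, dif_neg h]

theorem pvClimbUp_lt (nums : List Int) (i : Nat) (h : i < nums.length) :
    pvClimbUp nums i < nums.length := by
  induction i using pvClimbUp.induct nums with
  | case1 i hc ih => rw [pvClimbUp, dif_pos hc]; exact ih hc.1
  | case2 i hc => rw [pvClimbUp, dif_neg hc]; exact h

theorem pvClimbUp_steps (nums : List Int) (i : Nat) : IncOn nums i (pvClimbUp nums i) := by
  induction i using pvClimbUp.induct nums with
  | case1 i hc ih =>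
    intro k hik hk
    rw [pvClimbUp, dif_pos hc] at hk
    rcases Nat.eq_or_lt_of_le hik with h | h
    · exact h ▸ hc.2
    · exact ih k h hk
  | case2 i hc =>
    intro k hik hk
    rw [pvClimbUp, dif_neg hc] at hk; omega

theorem pvClimbUp_stop (nums : List Int) (i : Nat)
    (h : pvClimbUp nums i + 1 < nums.length) :
    ¬ nums.getD (pvClimbUp nums i) 0 < nums.getD (pvClimbUp nums i + 1) 0 := by
  induction i using pvClimbUp.induct nums with
  | case1 i hc ih => rw [pvClimbUp, dif_pos hc] at h ⊢; exact ih h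
  | case2 i hc =>
    rw [pvClimbUp, dif_neg hc] at h ⊢
    intro hlt; exact hc ⟨h, hlt⟩

theorem pvClimbDown_le (nums : List Int) (i : Nat) : i ≤ pvClimbDown nums i := by
  induction i using pvClimbDown.induct nums with
  | case1 i h ih => rw [pvClimbDown, dif_pos h]; omega
  | case2 i h => rw [pvClimbDown, dif_neg h]

theorem pvClimbDown_steps (nums : List Int) (i : Nat) : DecOn nums i (pvClimbDown nums i) := by
  induction i using pvClimbDown.induct nums with
  | case1 i hc ih =>
    intro k hik hk
    rw [pvClimbDown, dif_pos hc] at hk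
    rcases Nat.eq_or_lt_of_le hik with h | h
    · exact h ▸ hc.2
    · exact ih k h hk
  | case2 i hc =>
    intro k hik hk
    rw [pvClimbDown, dif_neg hc] at hk; omega

theorem pvClimbDown_stop (nums : List Int) (i : Nat)
    (h : pvClimbDown nums i + 1 < nums.length) :
    ¬ nums.getD (pvClimbDown nums i) 0 > nums.getD (pvClimbDown nums i + 1) 0 := by
  induction i using pvClimbDown.induct nums with
  | case1 i hc ih => rw [pvClimbDown, dif_pos hc] at h ⊢; exact ih h
  | case2 i hc =>
    rw [pvClimbDown, dif_neg hc] at h ⊢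
    intro hlt; exact hc ⟨h, hlt⟩

theorem pvClimbUp_max (nums : List Int) (i m : Nat) (hm : m < nums.length)
    (hinc : IncOn nums i m) : m ≤ pvClimbUp nums i := by
  by_contra h
  push_neg at h
  have hle := pvClimbUp_le nums i
  have hstep := hinc (pvClimbUp nums i) hle h
  exact pvClimbUp_stop nums i (by omega) hstep

theorem pvClimbDown_max (nums : List Int) (i m : Nat) (hm : m < nums.length)
    (hdec : DecOn nums i m) : m ≤ pvClimbDown nums i := by
  by_contra h
  push_neg at h
  have hle := pvClimbDown_le nums i
  have hstep := hdec (pvClimbDown nums i) hle h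
  exact pvClimbDown_stop nums i (by omega) hstep

theorem pvAllInc_iff (nums : List Int) (a b : Nat) :
    pvAllInc nums (a : Int) (b : Int) = true ↔ IncOn nums a b := by
  unfold pvAllInc IncOn
  rw [List.all_eq_true]
  constructor
  · intro h k hak hkb
    have hmem : (k : Int) ∈ PySem.List.pyRange a b 1 := by
      rw [PySem.List.mem_pyRange_one]; constructor <;> exact_mod_cast ‹_›
    have := h _ hmem
    simp only [decide_eq_true_eq] at this
    have h1 : PySem.List.pyGetD nums (k : Int) 0 = nums.getD k 0 := PySem.List.pyGetD_natCast nums k 0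
    have h2 : PySem.List.pyGetD nums ((k : Int) + 1) 0 = nums.getD (k+1) 0 := by
      have : ((k : Int) + 1) = ((k+1 : Nat) : Int) := by push_cast; ring
      rw [this]; exact PySem.List.pyGetD_natCast nums (k+1) 0
    rw [h1, h2] at this; exact this
  · intro h i hmem
    rw [PySem.List.mem_pyRange_one] at hmem
    have h0 : 0 ≤ i := le_trans (by exact_mod_cast Nat.zero_le a) hmem.1
    obtain ⟨k, rfl⟩ := Int.eq_ofNat_of_zero_le h0
    simp only [decide_eq_true_eq]
    have h1 : PySem.List.pyGetD nums (k : Int) 0 = nums.getD k 0 := PySem.List.pyGetD_natCast nums k 0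
    have h2 : PySem.List.pyGetD nums ((k : Int) + 1) 0 = nums.getD (k+1) 0 := by
      have : ((k : Int) + 1) = ((k+1 : Nat) : Int) := by push_cast; ring
      rw [this]; exact PySem.List.pyGetD_natCast nums (k+1) 0
    rw [h1, h2]
    exact h k (by exact_mod_cast hmem.1) (by exact_mod_cast hmem.2)

theorem pvAllDec_iff (nums : List Int) (a b : Nat) :
    pvAllDec nums (a : Int) (b : Int) = true ↔ DecOn nums a b := by
  unfold pvAllDec DecOn
  rw [List.all_eq_true]
  constructor
  · intro h k hak hkb
    have hmem : (k : Int) ∈ PySem.List.pyRange a b 1 := by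
      rw [PySem.List.mem_pyRange_one]; constructor <;> exact_mod_cast ‹_›
    have := h _ hmem
    simp only [decide_eq_true_eq] at this
    have h1 : PySem.List.pyGetD nums (k : Int) 0 = nums.getD k 0 := PySem.List.pyGetD_natCast nums k 0
    have h2 : PySem.List.pyGetD nums ((k : Int) + 1) 0 = nums.getD (k+1) 0 := by
      have : ((k : Int) + 1) = ((k+1 : Nat) : Int) := by push_cast; ring
      rw [this]; exact PySem.List.pyGetD_natCast nums (k+1) 0
    rw [h1, h2] at this; exact this
  · intro h i hmem
    rw [PySem.List.mem_pyRange_one] at hmem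
    have h0 : 0 ≤ i := le_trans (by exact_mod_cast Nat.zero_le a) hmem.1
    obtain ⟨k, rfl⟩ := Int.eq_ofNat_of_zero_le h0
    simp only [decide_eq_true_eq]
    have h1 : PySem.List.pyGetD nums (k : Int) 0 = nums.getD k 0 := PySem.List.pyGetD_natCast nums k 0
    have h2 : PySem.List.pyGetD nums ((k : Int) + 1) 0 = nums.getD (k+1) 0 := by
      have : ((k : Int) + 1) = ((k+1 : Nat) : Int) := by push_cast; ring
      rw [this]; exact PySem.List.pyGetD_natCast nums (k+1) 0
    rw [h1, h2]
    exact h k (by exact_mod_cast hmem.1) (by exact_mod_cast hmem.2)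

theorem isTrionic_iff (nums : List Int) : isTrionic nums = true ↔ TrionicSpec nums := by
  unfold isTrionic TrionicSpec
  simp only [List.any_eq_true, PySem.List.mem_pyRange_one, Bool.and_eq_true]
  constructor
  · rintro ⟨p, ⟨hp1, hp2⟩, q, ⟨hq1, hq2⟩, ⟨hi1, hd⟩, hi2⟩
    obtain ⟨pn, rfl⟩ := Int.eq_ofNat_of_zero_le (by omega : (0:Int) ≤ p)
    obtain ⟨qn, rfl⟩ := Int.eq_ofNat_of_zero_le (by omega : (0:Int) ≤ q)
    refine ⟨pn, qn, by exact_mod_cast hp1, by omega, by exact_mod_cast (by omega : (pn:Int) < qn), by omega, ?_, ?_, ?_⟩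
    · have := (pvAllInc_iff nums 0 pn).mp (by exact_mod_cast hi1)
      exact this
    · exact (pvAllDec_iff nums pn qn).mp hd
    · have hb : ((nums.length - 1 : Nat) : Int) = (nums.length : Int) - 1 := by omega
      exact (pvAllInc_iff nums qn (nums.length - 1)).mp (by rw [hb]; exact hi2)
  · rintro ⟨pn, qn, hp1, hp2, hpq, hq2, hi1, hd, hi2⟩
    refine ⟨(pn : Int), ⟨by exact_mod_cast hp1, by omega⟩, (qn : Int), ⟨by exact_mod_cast (by omega : (pn:Int) + 1 ≤ qn), by omega⟩, ⟨?_, ?_⟩, ?_⟩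
    · exact_mod_cast (pvAllInc_iff nums 0 pn).mpr hi1
    · exact (pvAllDec_iff nums pn qn).mpr hd
    · have hb : ((nums.length - 1 : Nat) : Int) = (nums.length : Int) - 1 := by omega
      rw [← hb]; exact (pvAllInc_iff nums qn (nums.length - 1)).mpr hi2

theorem isTrionic_alt_iff (nums : List Int) : isTrionic_alt nums = true ↔ TrionicSpec nums := by
  rw [show isTrionic_alt nums = (if nums.length < 4 then false else if pvClimbUp nums 0 = 0 ∨ nums.length - 2 ≤ pvClimbUp nums 0 then false else if pvClimbDown nums (pvClimbUp nums 0) = pvClimbUp nums 0 ∨ nums.length - 1 ≤ pvClimbDown nums (pvClimbUp nums 0) then false else decide (pvClimbUp nums (pvClimbDown nums (pvClimbUp nums 0)) = nums.length - 1)) from rfl]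
  unfold TrionicSpec
  constructor
  · intro h
    split_ifs at h with h4 hp hq
    simp only [decide_eq_true_eq] at h
    push_neg at h4 hp hq
    have hle1 := pvClimbDown_le nums (pvClimbUp nums 0)
    refine ⟨pvClimbUp nums 0, pvClimbDown nums (pvClimbUp nums 0), by omega, by omega,
      by omega, by omega, ?_, ?_, ?_⟩
    · exact fun k hk hk' => pvClimbUp_steps nums 0 k hk hk'
    · exact fun k hk hk' => pvClimbDown_steps nums (pvClimbUp nums 0) k hk hk'
    · intro k hk hk'
      exact pvClimbUp_steps nums (pvClimbDown nums (pvClimbUp nums 0)) k hk (by omega)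
  · rintro ⟨p, q, hp1, hp2, hpq, hq2, hi1, hd, hi2⟩
    have hn4 : ¬ nums.length < 4 := by omega
    have hpeq : pvClimbUp nums 0 = p := by
      have h1 : p ≤ pvClimbUp nums 0 :=
        pvClimbUp_max nums 0 p (by omega) (fun k hk hk' => hi1 k hk hk')
      have h2 : pvClimbUp nums 0 ≤ p := by
        by_contra hc
        push_neg at hc
        have := pvClimbUp_steps nums 0 p (Nat.zero_le p) hc
        have := hd p (le_refl p) hpq
        omega
      omega
    have hqeq : pvClimbDown nums p = q := by
      have h1 : q ≤ pvClimbDown nums p :=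
        pvClimbDown_max nums p q (by omega) hd
      have h2 : pvClimbDown nums p ≤ q := by
        by_contra hc
        push_neg at hc
        have := pvClimbDown_steps nums p q (by omega) hc
        have := hi2 q (le_refl q) (by omega)
        omega
      omega
    have hreq : pvClimbUp nums q = nums.length - 1 := by
      have h1 : nums.length - 1 ≤ pvClimbUp nums q :=
        pvClimbUp_max nums q (nums.length - 1) (by omega) hi2
      have h2 : pvClimbUp nums q < nums.length := pvClimbUp_lt nums q (by omega)
      omega
    rw [if_neg hn4, hpeq, if_neg (by omega : ¬ (p = 0 ∨ nums.length - 2 ≤ p)), hqeq,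
      if_neg (by omega : ¬ (q = p ∨ nums.length - 1 ≤ q)), hreq]
    simp

-- ===== VERDICT (by name: the statement is the Claim_ definition above) =====
theorem isTrionic_spec : Claim_equal_isTrionic := by
  intro nums _
  unfold Spec_isTrionic
  exact Bool.eq_iff_iff.mpr ((isTrionic_iff nums).trans (isTrionic_alt_iff nums).symm)
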